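-- pv_equiv track=rewrite | github.com/Solving-this-Problem/19th_study | 택배 배달과 수거하기/민웅.py | solution
-- ===== SOURCE A (Python) =====
-- def solution(cap, n, deliveries, pickups):
--     ans = 0
--     d_cnt, p_cnt = 0, 0
--     for i in range(n-1, -1, -1):
--         if deliveries[i] or pickups[i]:
--             d_cnt += deliveries[i]
--             p_cnt += pickups[i]
--             while d_cnt > 0 or p_cnt > 0:
--                 d_cnt -= cap
--                 p_cnt -= cap
--                 ans += 2*(i+1)
--         else:
--             continue
--     return ans
-- ===== SOURCE B (Python) =====
-- def solution(cap, n, deliveries, pickups):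
--     ans = 0
--     d = p = 0
--     for i in range(n - 1, -1, -1):
--         d += deliveries[i]
--         p += pickups[i]
--         need = max(d, p)
--         if need > 0:
--             trips = -(-need // cap)  # ceil-division: number of trips serving position i
--             ans += 2 * (i + 1) * trips
--             d -= trips * cap
--             p -= trips * cap
--     return ans
-- ===== Notes on version B (the rewrite author's own statement) =====
-- stated objective: alternative
-- what changed: The inner while loop that subtracts cap once per truck trip is replaced by a single ceil-division computing the trip count for each position, so the per-position work is a constant instead of one iteration per trip.
-- outside the precondition, e.g. on solution(0, 1, [0], [0]): A returns 0, B returns 0; on solution(-2, 2, [0, 0], [0, 0]): A returns 0, B returns 0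
import Mathlib
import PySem

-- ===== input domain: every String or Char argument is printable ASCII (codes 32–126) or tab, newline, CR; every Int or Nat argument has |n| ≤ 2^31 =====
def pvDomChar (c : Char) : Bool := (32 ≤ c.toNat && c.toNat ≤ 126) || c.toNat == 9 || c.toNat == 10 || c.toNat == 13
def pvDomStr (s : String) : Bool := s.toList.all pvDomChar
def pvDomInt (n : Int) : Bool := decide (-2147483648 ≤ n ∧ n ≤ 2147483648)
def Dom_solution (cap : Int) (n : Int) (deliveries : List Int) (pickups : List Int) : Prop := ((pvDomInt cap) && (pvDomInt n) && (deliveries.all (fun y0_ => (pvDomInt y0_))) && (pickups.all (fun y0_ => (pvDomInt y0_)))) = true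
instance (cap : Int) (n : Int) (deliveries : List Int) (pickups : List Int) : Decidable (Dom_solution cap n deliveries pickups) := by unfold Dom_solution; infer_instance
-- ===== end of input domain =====

-- B replaces A's inner while loop (one iteration per truck trip) by a single ceil-division
-- computing the trip count per position: objective = alternative (constant work per position).


-- ===== PORT A =====
-- inner 'while d_cnt > 0 or p_cnt > 0' loop; the fuel only makes the recursion total:
-- with cap ≥ 1 (Pre_) fuel (max d p).toNat always suffices, and cap ≤ 0 (Python diverges) is outside Pre_.
def solutionWhile (cap : Int) : Nat → Int → Int → Int → Int → Int × Int × Int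
  | 0, d, p, ans, _ => (ans, d, p)
  | (fuel+1), d, p, ans, inc =>
      if 0 < d ∨ 0 < p then solutionWhile cap fuel (d - cap) (p - cap) (ans + inc) inc
      else (ans, d, p)

def solution (cap : Int) (n : Int) (deliveries : List Int) (pickups : List Int) : Int :=
  ((PySem.List.pyRange (n-1) (-1) (-1)).foldl (fun (st : Int × Int × Int) i =>
      let dv := (PySem.List.pyGet? deliveries i).getD 0  -- Pre_ keeps every index in range
      let pv := (PySem.List.pyGet? pickups i).getD 0
      if dv ≠ 0 ∨ pv ≠ 0 then
        solutionWhile cap (max (st.2.1 + dv) (st.2.2 + pv)).toNat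
          (st.2.1 + dv) (st.2.2 + pv) st.1 (2*(i+1))
      else st) ((0 : Int), (0 : Int), (0 : Int))).1

-- ===== PORT B =====
def solution_alt (cap : Int) (n : Int) (deliveries : List Int) (pickups : List Int) : Int :=
  ((PySem.List.pyRange (n-1) (-1) (-1)).foldl (fun (st : Int × Int × Int) i =>
      let d := st.2.1 + (PySem.List.pyGet? deliveries i).getD 0  -- Pre_ keeps every index in range
      let p := st.2.2 + (PySem.List.pyGet? pickups i).getD 0
      let need := max d p
      if 0 < need then
        let trips := -(PySem.Int.floordiv (-need) cap)
        (st.1 + 2*(i+1)*trips, d - trips*cap, p - trips*cap)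
      else (st.1, d, p)) ((0 : Int), (0 : Int), (0 : Int))).1

-- ===== PRECONDITION & SPEC =====
-- Pre_ excludes cap ≤ 0, where A's inner while loop diverges as soon as any accumulated load is
-- positive (on the remaining cap ≤ 0 inputs A happens to return 0, as does B), and n larger than a
-- list length, where A raises IndexError.
def Pre_solution (cap : Int) (n : Int) (deliveries : List Int) (pickups : List Int) : Prop :=
  1 ≤ cap ∧ n ≤ (deliveries.length : Int) ∧ n ≤ (pickups.length : Int)
instance (cap : Int) (n : Int) (deliveries : List Int) (pickups : List Int) : Decidable (Pre_solution cap n deliveries pickups) := by unfold Pre_solution; infer_instance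

def pvWitness_solution : Int × Int × List Int × List Int := (4, 2, [1, 0], [0, 3])

def Spec_solution (cap : Int) (n : Int) (deliveries : List Int) (pickups : List Int) (out : Int) : Prop := out = solution_alt cap n deliveries pickups
instance (cap : Int) (n : Int) (deliveries : List Int) (pickups : List Int) (out : Int) : Decidable (Spec_solution cap n deliveries pickups out) := by unfold Spec_solution; infer_instance

-- ===== CLAIM (what is proved, stated in full; the proofs are below) =====
def Claim_equal_solution : Prop := ∀ (cap : Int) (n : Int) (deliveries : List Int) (pickups : List Int), Dom_solution cap n deliveries pickups → Pre_solution cap n deliveries pickups → Spec_solution cap n deliveries pickups (solution cap n deliveries pickups)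

-- ===== LEMMAS AND PROOFS =====

-- trip count of the while loop, as B computes it
def pvTrips (cap m : Int) : Int := if 0 < m then -(PySem.Int.floordiv (-m) cap) else 0

theorem pvTrips_spec (cap m : Int) (hc : 1 ≤ cap) (hm : 0 < m) :
    (pvTrips cap m - 1) * cap < m ∧ m ≤ pvTrips cap m * cap := by
  have h := (PySem.Int.neg_floordiv_neg_eq_iff_of_pos (a := m) (b := cap)
    (q := -(PySem.Int.floordiv (-m) cap)) (by omega)).mp rfl
  simpa [pvTrips, hm] using h

theorem pvTrips_step (cap m : Int) (hc : 1 ≤ cap) (hm : 0 < m) :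
    pvTrips cap m = pvTrips cap (m - cap) + 1 := by
  have key : -(PySem.Int.floordiv (-m) cap) = pvTrips cap (m - cap) + 1 := by
    apply (PySem.Int.neg_floordiv_neg_eq_iff_of_pos (a := m) (b := cap) (by omega)).mpr
    by_cases h : 0 < m - cap
    · have h2 := pvTrips_spec cap (m - cap) hc h
      constructor <;> nlinarith [h2.1, h2.2]
    · have h0 : pvTrips cap (m - cap) = 0 := by simp only [pvTrips, if_neg h]
      rw [h0]; constructor <;> nlinarith
  simpa [pvTrips, hm] using key

theorem pvTrips_nonpos (cap m : Int) (hm : ¬ 0 < m) : pvTrips cap m = 0 := by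
  simp [pvTrips, hm]

-- the slack after the computed trips is nonpositive (loop-exit condition)
theorem pvTrips_slack (cap m : Int) (hc : 1 ≤ cap) : m - pvTrips cap m * cap ≤ 0 := by
  by_cases hm : 0 < m
  · have h := pvTrips_spec cap m hc hm; omega
  · rw [pvTrips_nonpos cap m hm]; omega

theorem solutionWhile_eq (cap : Int) (hc : 1 ≤ cap) :
    ∀ (fuel : Nat) (d p ans inc : Int), (max d p).toNat ≤ fuel →
    solutionWhile cap fuel d p ans inc =
      (ans + inc * pvTrips cap (max d p), d - pvTrips cap (max d p) * cap,
       p - pvTrips cap (max d p) * cap) := by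
  intro fuel
  induction fuel with
  | zero =>
    intro d p ans inc hf
    have hm : ¬ 0 < max d p := by omega
    simp [solutionWhile, pvTrips_nonpos cap _ hm]
  | succ k ih =>
    intro d p ans inc hf
    by_cases hcond : 0 < d ∨ 0 < p
    · have hm : 0 < max d p := by omega
      have hmax : max (d - cap) (p - cap) = max d p - cap := by
        rcases max_cases d p with ⟨h1, h2⟩ | ⟨h1, h2⟩ <;> rcases max_cases (d - cap) (p - cap) with ⟨g1, g2⟩ | ⟨g1, g2⟩ <;> omega
      have hfs : (max (d - cap) (p - cap)).toNat ≤ k := by rw [hmax]; omega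
      have hstep := pvTrips_step cap (max d p) hc hm
      have hrec : solutionWhile cap (k+1) d p ans inc = solutionWhile cap k (d - cap) (p - cap) (ans + inc) inc := by
        simp [solutionWhile, hcond]
      rw [hrec, ih (d - cap) (p - cap) (ans + inc) inc hfs, hmax]
      refine Prod.ext ?_ (Prod.ext ?_ ?_) <;> simp only [] <;> rw [hstep] <;> ring
    · have hm : ¬ 0 < max d p := by omega
      simp [solutionWhile, hcond, pvTrips_nonpos cap _ hm]

-- one position: A's step (guard + while loop) equals the (ans, d, p) triple B computes
theorem pv_stepA_eq (cap dv pv d p ans i : Int) (hc : 1 ≤ cap) (hd : d ≤ 0) (hp : p ≤ 0) :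
    (if dv ≠ 0 ∨ pv ≠ 0 then
       solutionWhile cap (max (d + dv) (p + pv)).toNat (d + dv) (p + pv) ans (2*(i+1))
     else ((ans, d, p) : Int × Int × Int)) =
    (ans + 2*(i+1) * pvTrips cap (max (d + dv) (p + pv)),
     d + dv - pvTrips cap (max (d + dv) (p + pv)) * cap,
     p + pv - pvTrips cap (max (d + dv) (p + pv)) * cap) := by
  by_cases hz : dv ≠ 0 ∨ pv ≠ 0
  · rw [if_pos hz]
    exact solutionWhile_eq cap hc _ (d + dv) (p + pv) ans (2*(i+1)) le_rfl
  · push Not at hz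
    rw [if_neg (by push Not; exact hz), hz.1, hz.2]
    have hm : ¬ 0 < max (d + 0) (p + 0) := by simp; omega
    rw [pvTrips_nonpos cap _ hm]
    simp

-- one position: B's step equals the same triple
theorem pv_stepB_eq (cap dv pv d p ans i : Int) :
    (if 0 < max (d + dv) (p + pv) then
       (ans + 2*(i+1) * (-(PySem.Int.floordiv (-(max (d + dv) (p + pv))) cap)),
        d + dv - (-(PySem.Int.floordiv (-(max (d + dv) (p + pv))) cap)) * cap,
        p + pv - (-(PySem.Int.floordiv (-(max (d + dv) (p + pv))) cap)) * cap)
     else ((ans, d + dv, p + pv) : Int × Int × Int)) =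
    (ans + 2*(i+1) * pvTrips cap (max (d + dv) (p + pv)),
     d + dv - pvTrips cap (max (d + dv) (p + pv)) * cap,
     p + pv - pvTrips cap (max (d + dv) (p + pv)) * cap) := by
  by_cases hm : 0 < max (d + dv) (p + pv)
  · rw [if_pos hm]; simp [pvTrips, hm]
  · rw [if_neg hm, pvTrips_nonpos cap _ hm]; simp

theorem pv_fold_eq (cap : Int) (hc : 1 ≤ cap) (deliveries pickups : List Int) :
    ∀ (l : List Int) (ans d p : Int), d ≤ 0 → p ≤ 0 →
    (l.foldl (fun (st : Int × Int × Int) i =>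
      let dv := (PySem.List.pyGet? deliveries i).getD 0
      let pv := (PySem.List.pyGet? pickups i).getD 0
      if dv ≠ 0 ∨ pv ≠ 0 then
        solutionWhile cap (max (st.2.1 + dv) (st.2.2 + pv)).toNat
          (st.2.1 + dv) (st.2.2 + pv) st.1 (2*(i+1))
      else st) (ans, d, p)) =
    (l.foldl (fun (st : Int × Int × Int) i =>
      let d := st.2.1 + (PySem.List.pyGet? deliveries i).getD 0
      let p := st.2.2 + (PySem.List.pyGet? pickups i).getD 0
      let need := max d p
      if 0 < need then
        let trips := -(PySem.Int.floordiv (-need) cap)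
        (st.1 + 2*(i+1)*trips, d - trips*cap, p - trips*cap)
      else (st.1, d, p)) (ans, d, p)) := by
  intro l
  induction l with
  | nil => intro ans d p _ _; rfl
  | cons x xs ih =>
    intro ans d p hd hp
    simp only [List.foldl_cons]
    rw [pv_stepA_eq cap _ _ d p ans x hc hd hp, pv_stepB_eq cap _ _ d p ans x]
    have hslack := pvTrips_slack cap (max (d + (PySem.List.pyGet? deliveries x).getD 0)
      (p + (PySem.List.pyGet? pickups x).getD 0)) hc
    exact ih _ _ _ (by omega) (by omega)

-- ===== VERDICT (by name: the statement is the Claim_ definition above) =====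
theorem solution_spec : Claim_equal_solution := by
  intro cap n deliveries pickups _hDom hPre
  unfold Spec_solution solution solution_alt
  rw [pv_fold_eq cap hPre.1 deliveries pickups _ 0 0 0 le_rfl le_rfl]
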